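-- pv_equiv track=rewrite | github.com/glasgowm148/discord_summariser_ai | helpers/processors/content_relationship_analyzer.py | _extract_technical_keywords
-- ===== SOURCE A (Python) =====
-- from typing import Dict, List, Set, Tuple
--
-- def _extract_technical_keywords(items: List[str]) -> Set[str]:
--     """
--     Extract technical keywords from discussion items.
--
--     Args:
--         items: List of content items
--
--     Returns:
--         Set of technical keywords
--     """
--     technical_keywords = {
--         'mining', 'blockchain', 'protocol', 'network', 'performance',
--         'optimization', 'strategy', 'development', 'infrastructure',
--         'wallet', 'transaction', 'smart contract', 'consensus', 'node'
--     }
--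
--     found_keywords = set()
--     for item in items:
--         item_lower = item.lower()
--         found_keywords.update(
--             keyword for keyword in technical_keywords
--             if keyword in item_lower
--         )
--
--     return found_keywords
-- ===== SOURCE B (Python) =====
-- def _extract_technical_keywords(items):
--     """Same result as A; maintains a shrinking candidate list: once a keyword
--     is found it is removed from `remaining`, and the loop breaks early when no
--     candidates are left."""
--     technical_keywords = [
--         'mining', 'blockchain', 'protocol', 'network', 'performance',
--         'optimization', 'strategy', 'development', 'infrastructure',
--         'wallet', 'transaction', 'smart contract', 'consensus', 'node'
--     ]
--     found = set()
--     remaining = technical_keywords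
--     for item in items:
--         if not remaining:
--             break
--         low = item.lower()
--         found.update(k for k in remaining if k in low)
--         remaining = [k for k in remaining if k not in low]
--     return found
-- ===== Notes on version B (the rewrite author's own statement) =====
-- stated objective: alternative
-- what changed: B maintains a shrinking list of not-yet-found candidate keywords (matched keywords are removed after each item) and breaks out of the item loop as soon as every keyword has been found, instead of re-scanning the full keyword set for every item and accumulating via set.update over the whole set.
import Mathlib
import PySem

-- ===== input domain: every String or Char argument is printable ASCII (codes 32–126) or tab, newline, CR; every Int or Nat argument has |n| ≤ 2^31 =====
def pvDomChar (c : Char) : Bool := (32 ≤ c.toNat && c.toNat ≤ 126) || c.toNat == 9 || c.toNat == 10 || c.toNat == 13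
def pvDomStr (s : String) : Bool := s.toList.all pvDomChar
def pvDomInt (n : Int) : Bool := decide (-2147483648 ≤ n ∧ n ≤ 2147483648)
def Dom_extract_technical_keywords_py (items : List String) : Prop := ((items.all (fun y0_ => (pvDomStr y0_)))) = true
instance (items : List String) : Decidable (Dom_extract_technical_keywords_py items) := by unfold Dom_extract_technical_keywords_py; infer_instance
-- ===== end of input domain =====

-- B keeps a shrinking list of not-yet-found candidate keywords and breaks early once all are found,
-- instead of re-scanning the full keyword set for every item (objective: alternative; same set returned).

-- the fixed keyword set (a Python set literal; its iteration order is not observable in the result set)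
def pvKws : List String :=
  ["mining", "blockchain", "protocol", "network", "performance",
   "optimization", "strategy", "development", "infrastructure",
   "wallet", "transaction", "smart contract", "consensus", "node"]

-- ===== PORT A =====
def extract_technical_keywords_py (items : List String) : List String :=
  items.foldl (fun found item =>
    let item_lower := PySem.Str.lower item
    PySem.Set.update found (pvKws.filter (fun keyword => PySem.Str.isIn keyword item_lower)))
    PySem.Set.empty

-- ===== PORT B =====
def pvAltGo : List String → PySem.Set String → List String → PySem.Set String
  | [], found, _ => found
  | item :: rest, found, remaining =>
    if remaining.isEmpty then found
    else
      let low := PySem.Str.lower item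
      let found' := PySem.Set.update found (remaining.filter (fun k => PySem.Str.isIn k low))
      let remaining' := remaining.filter (fun k => !PySem.Str.isIn k low)
      pvAltGo rest found' remaining'

def extract_technical_keywords_py_alt (items : List String) : List String :=
  pvAltGo items PySem.Set.empty pvKws

-- ===== PRECONDITION & SPEC =====
def Spec_extract_technical_keywords_py (items : List String) (out : List String) : Prop := out = extract_technical_keywords_py_alt items
instance (items : List String) (out : List String) : Decidable (Spec_extract_technical_keywords_py items out) := by unfold Spec_extract_technical_keywords_py; infer_instance

-- ===== CLAIM (what is proved, stated in full; the proofs are below) =====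
def Claim_equal_extract_technical_keywords_py : Prop := ∀ (items : List String), Dom_extract_technical_keywords_py items → Spec_extract_technical_keywords_py items (extract_technical_keywords_py items)

-- ===== LEMMAS AND PROOFS =====

lemma pvKws_nodup : pvKws.Nodup := by decide

-- the one step A performs per item
def pvStep (found : PySem.Set String) (item : String) : PySem.Set String :=
  let item_lower := PySem.Str.lower item
  PySem.Set.update found (pvKws.filter (fun keyword => PySem.Str.isIn keyword item_lower))

lemma step_eq_append (s : PySem.Set String) (item : String) :
    pvStep s item =
      s ++ (pvKws.filter (fun k => !PySem.Set.contains s k)).filter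
            (fun k => PySem.Str.isIn k (PySem.Str.lower item)) := by
  unfold pvStep
  rw [PySem.Set.update_eq_append_filter,
      PySem.Set.ofList_eq_self_of_nodup _ (pvKws_nodup.filter _), List.filter_filter]
  rw [List.filter_filter]
  exact congrArg (s ++ ·) (List.filter_congr (fun x _ => Bool.and_comm _ _))

-- main invariant: running B's loop from state (s, pvKws-minus-s) equals A's fold from s
lemma go_eq_foldl : ∀ (items : List String) (s : PySem.Set String),
    pvAltGo items s (pvKws.filter (fun k => !PySem.Set.contains s k)) =
      items.foldl pvStep s := by
  intro items
  induction items with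
  | nil => intro s; rfl
  | cons item rest ih =>
    intro s
    by_cases hr : pvKws.filter (fun k => !PySem.Set.contains s k) = []
    · -- every keyword already found: both sides stay at s
      have hstep : pvStep s item = s := by
        rw [step_eq_append, hr]; simp
      have hlhs : pvAltGo (item :: rest) s (pvKws.filter (fun k => !PySem.Set.contains s k)) = s := by
        rw [hr]; rfl
      rw [hlhs, List.foldl_cons, hstep, ← ih s, hr]
      cases rest <;> rfl
    · -- some keywords remain
      set p := fun k => PySem.Str.isIn k (PySem.Str.lower item) with hp
      set r := pvKws.filter (fun k => !PySem.Set.contains s k) with hrdef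
      have hgo : pvAltGo (item :: rest) s r =
          pvAltGo rest (PySem.Set.update s (r.filter p)) (r.filter (fun k => !p k)) := by
        rw [show pvAltGo (item :: rest) s r =
            if r.isEmpty then s else
              pvAltGo rest (PySem.Set.update s (r.filter p)) (r.filter (fun k => !p k)) from rfl]
        rw [if_neg (by simpa [List.isEmpty_iff] using hr)]
      have hmatched_nodup : (r.filter p).Nodup := (pvKws_nodup.filter _).filter _
      have hmatched_disj : ∀ x ∈ r.filter p, x ∉ s := by
        intro x hx
        have hxr : x ∈ pvKws.filter (fun k => !PySem.Set.contains s k) :=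
          hrdef ▸ List.mem_of_mem_filter hx
        have h2 := (List.mem_filter.mp hxr).2
        simp [PySem.Set.contains_eq_listContains] at h2
        exact h2
      have hupd : PySem.Set.update s (r.filter p) = s ++ r.filter p :=
        PySem.Set.update_eq_append_of_disjoint _ _ hmatched_nodup hmatched_disj
      have hstep : pvStep s item = s ++ r.filter p := by
        rw [step_eq_append]
      -- the new remaining list is exactly the candidates not in the new found set
      have hrem : pvKws.filter (fun k => !PySem.Set.contains (s ++ r.filter p) k)
          = (r.filter (fun k => !p k)) := by
        rw [hrdef, List.filter_filter, List.filter_filter]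
        apply List.filter_congr
        intro k hk
        cases hsk : PySem.Set.contains s k <;> cases hpk : p k <;>
          simp_all [PySem.Set.contains_eq_listContains, List.contains_eq_mem,
            List.mem_append, List.mem_filter]
      rw [hgo, hupd, List.foldl_cons, hstep, ← ih (s ++ r.filter p), hrem]

-- ===== VERDICT (by name: the statement is the Claim_ definition above) =====
theorem extract_technical_keywords_py_spec : Claim_equal_extract_technical_keywords_py := by
  intro items _
  unfold Spec_extract_technical_keywords_py extract_technical_keywords_py_alt extract_technical_keywords_py
  have h := go_eq_foldl items PySem.Set.empty
  have he : pvKws.filter (fun k => !PySem.Set.contains PySem.Set.empty k) = pvKws := by decide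
  rw [he] at h
  rw [h]
  rfl
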